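-- pv_equiv track=rewrite | github.com/Summity/pgauthor | code/rangefreq.py | cut_text
-- ===== SOURCE A (Python) =====
-- def word_count(text):
--     ## count words of any text input
--     return len([word for word in text.split() if word.isalpha()])
--
-- def cut_text(text, leng):
--     ## cut text into chunks of words in length leng, return an array of texts
--     count = word_count(text)
--     num = 0 # count words from 0 to count
--     chunk = ''
--     textarr = [ ]
--     for word in text.split():
--         if word.isalpha():
--             num += 1
--             chunk = chunk + ' ' + word
--             if num % leng != 0:
--                 if num == count:
--                     textarr.append(chunk)
--             else:
--                 textarr.append(str(chunk))
--                 chunk = ''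
--     return textarr
-- ===== SOURCE B (Python) =====
-- def cut_text(text, leng):
--     ## cut text into chunks of words in length leng, return an array of texts
--     words = [w for w in text.split() if w.isalpha()]
--     out = []
--     while words:
--         out.append(' ' + ' '.join(words[:leng]))
--         words = words[leng:]
--     return out
-- ===== Notes on version B (the rewrite author's own statement) =====
-- stated objective: simpler
-- what changed: Replaces the stateful counter/modulo fold (num, chunk accumulator, total pre-count, end-of-text special case) by filtering the alphabetic words once and slicing them off leng at a time, joining each slice.
-- outside the precondition, e.g. on cut_text('a b', 0): A raises ZeroDivisionError, B does not finish within the time limit; on cut_text('a b c', -2): A returns [' a b', ' c'], B does not finish within the time limit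
import Mathlib
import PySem

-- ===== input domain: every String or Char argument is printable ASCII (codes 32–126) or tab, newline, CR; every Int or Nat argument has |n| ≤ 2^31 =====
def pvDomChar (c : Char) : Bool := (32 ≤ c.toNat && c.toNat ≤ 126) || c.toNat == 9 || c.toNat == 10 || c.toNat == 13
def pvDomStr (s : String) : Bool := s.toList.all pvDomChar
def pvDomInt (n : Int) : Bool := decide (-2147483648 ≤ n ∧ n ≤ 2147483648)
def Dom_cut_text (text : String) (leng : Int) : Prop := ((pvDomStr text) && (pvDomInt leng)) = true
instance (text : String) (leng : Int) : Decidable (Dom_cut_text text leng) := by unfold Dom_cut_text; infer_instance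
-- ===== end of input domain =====

-- B replaces A's stateful counter/modulo/pre-count fold by filter-the-alphabetic-words-once
-- then slice off `leng` words at a time (objective: simpler). Equivalence is claimed for leng ≥ 1.

-- ===== PORT A =====
def word_count (text : String) : Int :=
  ((PySem.Chars.split₀ text.toList).filter (fun w => PySem.Chars.strIsalpha w)).length

def cutStep (leng count : Int) (st : Int × List Char × List (List Char)) (word : List Char) :
    Int × List Char × List (List Char) :=
  if PySem.Chars.strIsalpha word then
    let num := st.1 + 1
    let chunk := st.2.1 ++ ' ' :: word
    if PySem.Int.mod num leng ≠ 0 then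
      if num = count then (num, chunk, st.2.2 ++ [chunk]) else (num, chunk, st.2.2)
    else (num, [], st.2.2 ++ [chunk])
  else st

def cut_text (text : String) (leng : Int) : List String :=
  (((PySem.Chars.split₀ text.toList).foldl (cutStep leng (word_count text)) (0, [], [])).2.2).map
    (fun c => String.ofList c)

-- ===== PORT B =====
def chunksB (k : Nat) : List (List Char) → List (List Char)
  | [] => []
  | w :: ws => (' ' :: PySem.Chars.join [' '] (w :: ws.take (k-1))) :: chunksB k (ws.drop (k-1))
termination_by l => l.length
decreasing_by simp

def cut_text_alt (text : String) (leng : Int) : List String :=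
  (chunksB leng.toNat
      ((PySem.Chars.split₀ text.toList).filter (fun w => PySem.Chars.strIsalpha w))).map
    (fun c => String.ofList c)

-- ===== PRECONDITION & SPEC =====
-- Pre_ keeps the natural domain leng ≥ 1 (plus texts without alphabetic words, where the chunk
-- length is never consulted): when leng ≤ 0 and an alphabetic word is present, A raises
-- ZeroDivisionError (leng = 0) or chunks by |leng| — an accident of Python's modulo sign rule
-- (leng < 0) — while B loops forever there.
def Pre_cut_text (text : String) (leng : Int) : Prop :=
  1 ≤ leng ∨ (PySem.Chars.split₀ text.toList).filter (fun w => PySem.Chars.strIsalpha w) = []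
instance (text : String) (leng : Int) : Decidable (Pre_cut_text text leng) := by
  unfold Pre_cut_text; infer_instance
def pvWitness_cut_text : String × Int := ("a b c", 2)

def Spec_cut_text (text : String) (leng : Int) (out : List String) : Prop := out = cut_text_alt text leng
instance (text : String) (leng : Int) (out : List String) : Decidable (Spec_cut_text text leng out) := by unfold Spec_cut_text; infer_instance

-- ===== CLAIM (what is proved, stated in full; the proofs are below) =====
def Claim_equal_cut_text : Prop := ∀ (text : String) (leng : Int), Dom_cut_text text leng → Pre_cut_text text leng → Spec_cut_text text leng (cut_text text leng)

-- ===== LEMMAS AND PROOFS =====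

-- the no-guard step (A's loop body on an alphabetic word)
def stepAlpha (leng count : Int) (st : Int × List Char × List (List Char)) (word : List Char) :
    Int × List Char × List (List Char) :=
  let num := st.1 + 1
  let chunk := st.2.1 ++ ' ' :: word
  if PySem.Int.mod num leng ≠ 0 then
    if num = count then (num, chunk, st.2.2 ++ [chunk]) else (num, chunk, st.2.2)
  else (num, [], st.2.2 ++ [chunk])

def render (ws : List (List Char)) : List Char := ws.flatMap (fun w => ' ' :: w)

theorem foldl_cutStep_filter (leng count : Int) (l : List (List Char))
    (st : Int × List Char × List (List Char)) :
    l.foldl (cutStep leng count) st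
      = (l.filter (fun w => PySem.Chars.strIsalpha w)).foldl (stepAlpha leng count) st := by
  induction l generalizing st with
  | nil => rfl
  | cons w l ih =>
      by_cases h : PySem.Chars.strIsalpha w
      · simp [h, List.foldl_cons, cutStep, stepAlpha, ih]
      · simp [h, List.foldl_cons, cutStep, ih]

theorem render_eq_join (ws : List (List Char)) (h : ws ≠ []) :
    render ws = ' ' :: PySem.Chars.join [' '] ws := by
  induction ws with
  | nil => exact absurd rfl h
  | cons w rest ih =>
      cases rest with
      | nil => simp [render, PySem.Chars.join_singleton]
      | cons v l =>
          rw [PySem.Chars.join_cons_cons]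
          have := ih (by simp)
          simp only [render, List.flatMap_cons] at this ⊢
          rw [this]
          simp

-- one pass of A's loop over the remaining words, with r words still free in the current chunk
theorem loop_partial (k : Nat) (hk : 1 ≤ k) (ws : List (List Char)) :
    ∀ (r : Nat) (c : List Char) (n : Nat) (acc : List (List Char)), 1 ≤ r → r ≤ k →
      n % k = k - r →
      (ws.foldl (stepAlpha (k : Int) ((n + ws.length : Nat) : Int)) ((n : Int), c, acc)).2.2 =
        if ws = [] then acc
        else if ws.length ≤ r - 1 then acc ++ [c ++ render ws]
        else ((ws.drop r).foldl (stepAlpha (k : Int) ((n + ws.length : Nat) : Int))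
                (((n + r : Nat) : Int), [], acc ++ [c ++ render (ws.take r)])).2.2 := by
  induction ws with
  | nil => intro r c n acc h1 h2 h3; simp
  | cons w rest ih =>
      intro r c n acc h1 h2 h3
      have hlen : (w :: rest).length = rest.length + 1 := by simp
      rw [List.foldl_cons]
      by_cases hr : r = 1
      · -- the chunk is closed by this word
        subst hr
        have hm : (n + 1) % k = 0 := by
          rcases Nat.lt_or_ge k 2 with hk1 | hk2
          · have : k = 1 := by omega
            subst this; simp [Nat.mod_one]
          · rw [Nat.add_mod, h3, Nat.one_mod_eq_one.mpr (by omega),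
                Nat.sub_add_cancel hk, Nat.mod_self]
        have hstep : stepAlpha (k : Int) ((n + (w :: rest).length : Nat) : Int)
            ((n : Int), c, acc) w
            = (((n + 1 : Nat) : Int), [], acc ++ [c ++ ' ' :: w]) := by
          simp only [stepAlpha]
          have hcast : ((n : Int) + 1) = ((n + 1 : Nat) : Int) := by push_cast; ring
          rw [hcast, PySem.Int.mod_natCast, hm]
          simp
        rw [hstep, if_neg (by simp), if_neg (by simp)]
        simp [render]
      · -- the chunk stays open
        obtain ⟨r', rfl⟩ : ∃ r', r = r' + 1 := ⟨r - 1, by omega⟩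
        have hr2 : 1 ≤ r' := by omega
        have hm : (n + 1) % k = k - (r' + 1) + 1 := by
          rw [Nat.add_mod, h3, Nat.one_mod_eq_one.mpr (by omega)]
          exact Nat.mod_eq_of_lt (by omega)
        have hmne : (n + 1) % k ≠ 0 := by omega
        cases rest with
        | nil =>
            have hstep : stepAlpha (k : Int) ((n + ([w] : List (List Char)).length : Nat) : Int)
                ((n : Int), c, acc) w
                = (((n + 1 : Nat) : Int), c ++ ' ' :: w, acc ++ [c ++ ' ' :: w]) := by
              simp only [stepAlpha]
              have hcast : ((n : Int) + 1) = ((n + 1 : Nat) : Int) := by push_cast; ring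
              rw [hcast, PySem.Int.mod_natCast]
              have hc : (((n + 1) % k : Nat) : Int) ≠ 0 := by exact_mod_cast hmne
              rw [if_pos hc, if_pos (by norm_num)]
            rw [hstep]
            simp only [List.foldl_nil]
            rw [if_neg (by simp), if_pos (by simp; omega)]
            simp [render]
        | cons v l =>
            have hcnt : n + (w :: v :: l).length = (n + 1) + (v :: l).length := by
              simp; omega
            rw [hcnt]
            have hstep : stepAlpha (k : Int) (((n + 1) + (v :: l).length : Nat) : Int)
                ((n : Int), c, acc) w
                = (((n + 1 : Nat) : Int), c ++ ' ' :: w, acc) := by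
              simp only [stepAlpha]
              have hcast : ((n : Int) + 1) = ((n + 1 : Nat) : Int) := by push_cast; ring
              rw [hcast, PySem.Int.mod_natCast]
              have hc : (((n + 1) % k : Nat) : Int) ≠ 0 := by exact_mod_cast hmne
              have hne : ((n + 1 : Nat) : Int) ≠ (((n + 1) + (v :: l).length : Nat) : Int) := by
                have hl1 : (v :: l).length = l.length + 1 := by simp
                exact_mod_cast (by omega : ¬ (n + 1 = (n + 1) + (v :: l).length))
              rw [if_pos hc, if_neg hne]
            rw [hstep]
            rw [ih (r := r') (c := c ++ ' ' :: w) (n := n + 1) (acc := acc) hr2 (by omega)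
                (by rw [hm]; omega)]
            have hne1 : ¬(v :: l = ([] : List (List Char))) := by simp
            have hne2 : ¬(w :: v :: l = ([] : List (List Char))) := by simp
            rw [if_neg hne1, if_neg hne2]
            split_ifs with h4 h5 h5
            · simp [render]
            · exfalso; simp at h4 h5; omega
            · exfalso; simp at h4 h5; omega
            · have hdt : (w :: v :: l).drop (r' + 1) = (v :: l).drop r' := by simp
              have htk : (w :: v :: l).take (r' + 1) = w :: (v :: l).take r' := by simp
              have hnr : (n + 1) + r' = n + (r' + 1) := by omega
              rw [hdt, htk, hnr]
              simp [render]

-- A's loop from a chunk boundary produces exactly B's chunks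
theorem loop_chunks (k : Nat) (hk : 1 ≤ k) :
    ∀ (N : Nat) (ws : List (List Char)), ws.length ≤ N →
      ∀ (n : Nat) (acc : List (List Char)), n % k = 0 →
      (ws.foldl (stepAlpha (k : Int) ((n + ws.length : Nat) : Int)) ((n : Int), [], acc)).2.2 =
        acc ++ chunksB k ws := by
  intro N
  induction N with
  | zero =>
      intro ws hN n acc hn
      have : ws = [] := List.length_eq_zero_iff.mp (by omega)
      subst this
      simp [chunksB]
  | succ N ihN =>
      intro ws hN n acc hn
      cases ws with
      | nil => simp [chunksB]
      | cons w rest =>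
          rw [loop_partial k hk (w :: rest) k [] n acc hk le_rfl (by omega)]
          rw [if_neg (by simp : ¬(w :: rest = ([] : List (List Char))))]
          by_cases hsmall : (w :: rest).length ≤ k - 1
          · rw [if_pos hsmall]
            have hrl : rest.length + 1 ≤ k - 1 := by simpa using hsmall
            have ht : rest.take (k - 1) = rest := List.take_of_length_le (by omega)
            have hd : rest.drop (k - 1) = [] := List.drop_eq_nil_of_le (by omega)
            rw [chunksB, ht, hd, chunksB]
            rw [render_eq_join (w :: rest) (by simp)]
            simp
          · rw [if_neg hsmall]
            have hrl : ¬ (rest.length + 1 ≤ k - 1) := by simpa using hsmall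
            have hlc : (w :: rest).length = rest.length + 1 := by simp
            rw [hlc] at hN
            have hlen2 : ((w :: rest).drop k).length ≤ N := by
              rw [List.length_drop, hlc]; omega
            have hcnt : n + (w :: rest).length = (n + k) + ((w :: rest).drop k).length := by
              rw [List.length_drop, hlc]; omega
            rw [hcnt, ihN ((w :: rest).drop k) hlen2 (n + k) _ (by rw [Nat.add_mod_right]; exact hn)]
            obtain ⟨k', rfl⟩ : ∃ k', k = k' + 1 := ⟨k - 1, by omega⟩
            have htk : (w :: rest).take (k' + 1) = w :: rest.take k' := by simp
            have hdk : (w :: rest).drop (k' + 1) = rest.drop k' := by simp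
            rw [chunksB, htk, hdk]
            rw [render_eq_join (w :: rest.take k') (by simp)]
            simp

theorem cut_text_spec : Claim_equal_cut_text := by
  intro text leng _ hpre
  unfold Pre_cut_text at hpre
  unfold Spec_cut_text cut_text cut_text_alt
  rcases hpre with hpre | hempty
  case inr =>
    rw [foldl_cutStep_filter, hempty]
    simp [chunksB]
  have hk : 1 ≤ leng.toNat := by omega
  have hleng : ((leng.toNat : Nat) : Int) = leng := Int.toNat_of_nonneg (by omega)
  rw [foldl_cutStep_filter]
  have hcount : word_count text
      = ((0 + ((PySem.Chars.split₀ text.toList).filter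
          (fun w => PySem.Chars.strIsalpha w)).length : Nat) : Int) := by
    simp [word_count]
  rw [hcount, ← hleng]
  rw [show (0 : Int) = ((0 : Nat) : Int) from rfl]
  rw [loop_chunks leng.toNat hk _ _ le_rfl 0 [] (by simp)]
  simp
  have hmax : max leng 0 = leng := by omega
  rw [hmax]
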